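-- pv_equiv track=rewrite | github.com/QianFuv/UpLang | src/uplang/json_parser.py | _close_unbalanced_braces
-- ===== SOURCE A (Python) =====
-- def _close_unbalanced_braces(text: str) -> str:
--     """Close unbalanced object or array delimiters.
--
--     Args:
--         text: Source text that may end with missing closers.
--
--     Returns:
--         Text with appended closing delimiters when detectable.
--     """
--
--     open_curly = 0
--     close_curly = 0
--     open_square = 0
--     close_square = 0
--     in_string = False
--     escaped = False
--
--     for char in text:
--         if in_string:
--             if escaped:
--                 escaped = False
--             elif char == "\\":
--                 escaped = True
--             elif char == '"':
--                 in_string = False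
--             continue
--         if char == '"':
--             in_string = True
--             continue
--         if char == "{":
--             open_curly += 1
--         elif char == "}":
--             close_curly += 1
--         elif char == "[":
--             open_square += 1
--         elif char == "]":
--             close_square += 1
--
--     missing_curly = max(0, open_curly - close_curly)
--     missing_square = max(0, open_square - close_square)
--     if missing_curly == 0 and missing_square == 0:
--         return text
--     return text + ("]" * missing_square) + ("}" * missing_curly)
-- ===== SOURCE B (Python) =====
-- def _close_unbalanced_braces(text: str) -> str:
--     """Close unbalanced object or array delimiters (skip-string decomposition)."""
--     cleaned = []
--     i = 0
--     n = len(text)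
--     while i < n:
--         c = text[i]
--         if c == '"':
--             # skip the whole string literal (escapes consume the next char)
--             i += 1
--             while i < n:
--                 if text[i] == '\\':
--                     i += 2
--                 elif text[i] == '"':
--                     i += 1
--                     break
--                 else:
--                     i += 1
--         else:
--             cleaned.append(c)
--             i += 1
--     s = ''.join(cleaned)
--     missing_curly = max(0, s.count('{') - s.count('}'))
--     missing_square = max(0, s.count('[') - s.count(']'))
--     return text + ']' * missing_square + '}' * missing_curly
-- ===== Notes on version B (the rewrite author's own statement) =====
-- stated objective: alternative
-- what changed: Replaces the single-pass six-variable state machine (in_string/escaped flags plus four counters updated per character) by a two-phase decomposition: a skip-string scan first strips string literals out of the text, then the brace imbalance is computed by plain substring counts on the cleaned text, and the closers are appended unconditionally (zero repetitions when balanced).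
import Mathlib
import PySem

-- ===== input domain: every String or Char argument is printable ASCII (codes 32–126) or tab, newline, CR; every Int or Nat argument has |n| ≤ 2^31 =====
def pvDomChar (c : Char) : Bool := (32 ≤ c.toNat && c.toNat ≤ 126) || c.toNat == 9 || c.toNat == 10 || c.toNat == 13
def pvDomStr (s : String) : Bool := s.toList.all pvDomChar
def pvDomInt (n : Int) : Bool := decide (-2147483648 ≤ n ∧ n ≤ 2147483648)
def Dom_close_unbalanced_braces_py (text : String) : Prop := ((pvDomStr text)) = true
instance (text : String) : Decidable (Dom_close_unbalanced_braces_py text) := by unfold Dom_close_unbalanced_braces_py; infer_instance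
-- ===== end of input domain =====

-- B replaces A's one-pass six-variable state machine by a strip-string-literals pass
-- followed by plain counting (objective: alternative decomposition, same cost).


-- ===== PORT A =====
-- state: (open_curly, close_curly, open_square, close_square, in_string, escaped)
def cubStepA (st : Int × Int × Int × Int × Bool × Bool) (c : Char) :
    Int × Int × Int × Int × Bool × Bool :=
  match st with
  | (oc, cc, os, cs, inS, esc) =>
    if inS then
      if esc then (oc, cc, os, cs, true, false)
      else if c = '\\' then (oc, cc, os, cs, true, true)
      else if c = '"' then (oc, cc, os, cs, false, false)
      else (oc, cc, os, cs, true, false)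
    else if c = '"' then (oc, cc, os, cs, true, false)
    else if c = '{' then (oc + 1, cc, os, cs, inS, esc)
    else if c = '}' then (oc, cc + 1, os, cs, inS, esc)
    else if c = '[' then (oc, cc, os + 1, cs, inS, esc)
    else if c = ']' then (oc, cc, os, cs + 1, inS, esc)
    else (oc, cc, os, cs, inS, esc)

def close_unbalanced_braces_py (text : String) : String :=
  let st := text.toList.foldl cubStepA (0, 0, 0, 0, false, false)
  let missing_curly : Int := max 0 (st.1 - st.2.1)
  let missing_square : Int := max 0 (st.2.2.1 - st.2.2.2.1)
  if missing_curly = 0 ∧ missing_square = 0 then text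
  else text ++ String.ofList (List.replicate missing_square.toNat ']')
            ++ String.ofList (List.replicate missing_curly.toNat '}')

-- ===== PORT B =====
-- skip the remainder of a string literal (a backslash consumes the next char)
def cubSkipStr : List Char → List Char
  | [] => []
  | c :: rest =>
    if c = '\\' then cubSkipStr rest.tail
    else if c = '"' then rest
    else cubSkipStr rest
termination_by l => l.length
decreasing_by
  · exact Nat.lt_succ_of_le (by cases rest <;> simp)
  · simp

theorem cubSkipStr_length_le (l : List Char) : (cubSkipStr l).length ≤ l.length := by
  induction l using cubSkipStr.induct with
  | case1 => simp [cubSkipStr]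
  | case2 rest ih =>
      rw [cubSkipStr, if_pos rfl]
      have htail : rest.tail.length ≤ rest.length := by cases rest <;> simp
      exact le_trans ih (le_trans htail (Nat.le_succ _))
  | case3 rest h1 =>
      rw [cubSkipStr, if_neg h1, if_pos rfl]; exact Nat.le_succ _
  | case4 c rest h1 h2 ih =>
      rw [cubSkipStr, if_neg h1, if_neg h2]
      exact le_trans ih (Nat.le_succ _)

-- the characters of text outside string literals
def cubClean : List Char → List Char
  | [] => []
  | c :: rest =>
    if c = '"' then cubClean (cubSkipStr rest)
    else c :: cubClean rest
termination_by l => l.length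
decreasing_by
  · exact Nat.lt_succ_of_le (cubSkipStr_length_le rest)
  · simp

def close_unbalanced_braces_py_alt (text : String) : String :=
  let s := cubClean text.toList
  let missing_curly : Int := max 0 ((s.count '{' : Int) - (s.count '}' : Int))
  let missing_square : Int := max 0 ((s.count '[' : Int) - (s.count ']' : Int))
  text ++ String.ofList (List.replicate missing_square.toNat ']')
       ++ String.ofList (List.replicate missing_curly.toNat '}')

-- ===== PRECONDITION & SPEC =====
def Spec_close_unbalanced_braces_py (text : String) (out : String) : Prop := out = close_unbalanced_braces_py_alt text
instance (text : String) (out : String) : Decidable (Spec_close_unbalanced_braces_py text out) := by unfold Spec_close_unbalanced_braces_py; infer_instance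

-- ===== CLAIM (what is proved, stated in full; the proofs are below) =====
def Claim_equal_close_unbalanced_braces_py : Prop := ∀ (text : String), Dom_close_unbalanced_braces_py text → Spec_close_unbalanced_braces_py text (close_unbalanced_braces_py text)

-- ===== LEMMAS AND PROOFS =====

-- the four counters of a state
def cubCnts (st : Int × Int × Int × Int × Bool × Bool) : Int × Int × Int × Int :=
  (st.1, st.2.1, st.2.2.1, st.2.2.2.1)

-- escaped state: the next char is consumed unconditionally
theorem cubFold_escTrue (l : List Char) (oc cc os cs : Int) :
    cubCnts (l.foldl cubStepA (oc, cc, os, cs, true, true)) =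
    cubCnts (l.tail.foldl cubStepA (oc, cc, os, cs, true, false)) := by
  cases l with
  | nil => rfl
  | cons c rest => simp [List.foldl, cubStepA]

-- main invariant, by strong induction on length:
-- (1) from the outside-string state, the counters gain exactly the counts in cubClean l;
-- (2) from the inside-string state, folding l equals folding (cubSkipStr l) outside.
theorem cubMain (n : Nat) : ∀ (l : List Char), l.length ≤ n → ∀ (oc cc os cs : Int),
    (cubCnts (l.foldl cubStepA (oc, cc, os, cs, false, false)) =
      (oc + (cubClean l).count '{', cc + (cubClean l).count '}',
       os + (cubClean l).count '[', cs + (cubClean l).count ']')) ∧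
    (cubCnts (l.foldl cubStepA (oc, cc, os, cs, true, false)) =
      cubCnts ((cubSkipStr l).foldl cubStepA (oc, cc, os, cs, false, false))) := by
  induction n with
  | zero =>
    intro l hl oc cc os cs
    have : l = [] := List.length_eq_zero_iff.mp (Nat.le_zero.mp hl)
    subst this
    simp [cubClean, cubSkipStr, cubCnts]
  | succ n ih =>
    intro l hl oc cc os cs
    cases l with
    | nil => simp [cubClean, cubSkipStr, cubCnts]
    | cons c rest =>
      have hr : rest.length ≤ n := by simpa using Nat.lt_succ_iff.mp (Nat.lt_of_lt_of_le (by simp) hl)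
      constructor
      · by_cases hq : c = '"'
        · subst hq
          have hskip : (cubSkipStr rest).length ≤ n :=
            le_trans (cubSkipStr_length_le rest) hr
          have h1 := (ih rest hr oc cc os cs).2
          have h2 := (ih (cubSkipStr rest) hskip oc cc os cs).1
          rw [cubClean, if_pos rfl]
          calc cubCnts ((('"' : Char) :: rest).foldl cubStepA (oc, cc, os, cs, false, false))
              = cubCnts (rest.foldl cubStepA (oc, cc, os, cs, true, false)) := by
                simp [List.foldl, cubStepA]
            _ = cubCnts ((cubSkipStr rest).foldl cubStepA (oc, cc, os, cs, false, false)) := h1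
            _ = _ := h2
        · rw [cubClean, if_neg hq]
          by_cases h1 : c = '{' <;> by_cases h2 : c = '}' <;> by_cases h3 : c = '[' <;>
            by_cases h4 : c = ']' <;> subst_vars <;>
            simp_all [List.foldl, cubStepA, (ih rest hr)] <;> omega
      · by_cases hb : c = '\\'
        · subst hb
          have ht : rest.tail.length ≤ n := le_trans (by cases rest <;> simp : rest.tail.length ≤ rest.length) hr
          have := (ih rest.tail ht oc cc os cs).2
          rw [cubSkipStr, if_pos rfl]
          calc cubCnts ((('\\' : Char) :: rest).foldl cubStepA (oc, cc, os, cs, true, false))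
              = cubCnts (rest.foldl cubStepA (oc, cc, os, cs, true, true)) := by
                simp [List.foldl, cubStepA]
            _ = cubCnts (rest.tail.foldl cubStepA (oc, cc, os, cs, true, false)) :=
                cubFold_escTrue rest oc cc os cs
            _ = _ := this
        · by_cases hq : c = '"'
          · subst hq
            rw [cubSkipStr]
            simp [List.foldl, cubStepA]
          · rw [cubSkipStr, if_neg hb, if_neg hq]
            have := (ih rest hr oc cc os cs).2
            calc cubCnts ((c :: rest).foldl cubStepA (oc, cc, os, cs, true, false))
                = cubCnts (rest.foldl cubStepA (oc, cc, os, cs, true, false)) := by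
                  simp [List.foldl, cubStepA, hb, hq]
              _ = _ := this

-- ===== VERDICT (by name: the statement is the Claim_ definition above) =====
theorem close_unbalanced_braces_py_spec : Claim_equal_close_unbalanced_braces_py := by
  intro text _
  show close_unbalanced_braces_py text = close_unbalanced_braces_py_alt text
  unfold close_unbalanced_braces_py close_unbalanced_braces_py_alt
  have h := (cubMain text.toList.length text.toList le_rfl 0 0 0 0).1
  simp only [zero_add] at h
  have h1 : (text.toList.foldl cubStepA (0, 0, 0, 0, false, false)).1
      = ((cubClean text.toList).count '{' : Int) := congrArg (fun p => p.1) h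
  have h2 : (text.toList.foldl cubStepA (0, 0, 0, 0, false, false)).2.1
      = ((cubClean text.toList).count '}' : Int) := congrArg (fun p => p.2.1) h
  have h3 : (text.toList.foldl cubStepA (0, 0, 0, 0, false, false)).2.2.1
      = ((cubClean text.toList).count '[' : Int) := congrArg (fun p => p.2.2.1) h
  have h4 : (text.toList.foldl cubStepA (0, 0, 0, 0, false, false)).2.2.2.1
      = ((cubClean text.toList).count ']' : Int) := congrArg (fun p => p.2.2.2) h
  simp only [h1, h2, h3, h4]
  split
  · next hz =>
    obtain ⟨hc, hs⟩ := hz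
    rw [hc, hs]
    simp [String.ofList_nil]
  · rfl
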